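-- pv_equiv track=rewrite | github.com/aaronriekenberg/api-benchmark | tools/generate_chart.py | pick_rows_for_plot
-- ===== SOURCE A (Python) =====
-- def pick_rows_for_plot(rows, target_conns=800):
--     # For each Test Name choose row with target_conns if available, else max conns
--     groups = {}
--     for r in rows:
--         name = r.get('Test Name')
--         try:
--             conns = int(r.get('HTTP Conns', '0'))
--         except ValueError:
--             conns = 0
--         groups.setdefault(name, []).append((conns, r))
--
--     chosen = []
--     for name, lst in groups.items():
--         exact = [t for t in lst if t[0] == target_conns]
--         if exact:
--             chosen.append(exact[0][1])
--         else:
--             # pick row with max conns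
--             chosen.append(max(lst, key=lambda x: x[0])[1])
--     return chosen
-- ===== SOURCE B (Python) =====
-- def pick_rows_for_plot(rows, target_conns=800):
--     # Single pass: keep, per test name, the current best (conns, row, locked-on-exact-match).
--     best = {}
--     for r in rows:
--         name = r.get('Test Name')
--         try:
--             conns = int(r.get('HTTP Conns', '0'))
--         except ValueError:
--             conns = 0
--         if name not in best:
--             best[name] = (conns, r, conns == target_conns)
--         else:
--             c0, _, exact0 = best[name]
--             if exact0:
--                 continue
--             if conns == target_conns:
--                 best[name] = (conns, r, True)
--             elif conns > c0:
--                 best[name] = (conns, r, False)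
--     return [v[1] for v in best.values()]
-- ===== Notes on version B (the rewrite author's own statement) =====
-- stated objective: simpler
-- what changed: B replaces A's two-phase group-by-name-into-lists-then-rescan-each-group with a single pass that keeps one best (conns, row, locked-on-exact-match) entry per name and returns the dict's rows in insertion order.
import Mathlib
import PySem

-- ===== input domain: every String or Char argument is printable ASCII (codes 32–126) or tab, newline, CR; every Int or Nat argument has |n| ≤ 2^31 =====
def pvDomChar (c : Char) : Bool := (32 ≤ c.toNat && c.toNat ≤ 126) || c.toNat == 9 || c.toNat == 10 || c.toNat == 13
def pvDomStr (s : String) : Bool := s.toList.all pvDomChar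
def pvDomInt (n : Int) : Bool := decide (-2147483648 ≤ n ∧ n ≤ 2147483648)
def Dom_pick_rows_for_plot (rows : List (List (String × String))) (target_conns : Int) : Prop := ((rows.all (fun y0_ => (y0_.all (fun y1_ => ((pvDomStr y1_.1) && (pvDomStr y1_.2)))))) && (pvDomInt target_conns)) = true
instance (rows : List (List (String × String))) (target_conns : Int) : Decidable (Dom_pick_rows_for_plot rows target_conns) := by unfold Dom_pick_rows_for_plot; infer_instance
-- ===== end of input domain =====

-- B replaces A's build-group-lists-then-rescan with a single pass keeping one best entry per name (simpler decomposition, same cost).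

-- shared leaf helpers (both Pythons read the two row fields identically)
-- r.get(k) on a row dict (association list, first match)
def rget (r : List (String × String)) (k : String) : Option String :=
  (PySem.Dict.mk r).get? k

-- name = r.get('Test Name')
def nameOf (r : List (String × String)) : Option String := rget r "Test Name"

-- conns = int(r.get('HTTP Conns', '0')) with ValueError -> 0
def connsOf (r : List (String × String)) : Int :=
  match PySem.Int.ofStr? ((rget r "HTTP Conns").getD "0") with
  | some n => n
  | none => 0

-- ===== PORT A =====
def pick_rows_for_plot (rows : List (List (String × String))) (target_conns : Int) :
    List (List (String × String)) :=
  let groups : PySem.Dict (Option String) (List (Int × List (String × String))) :=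
    rows.foldl (fun d r => d.modify (nameOf r) [] (· ++ [(connsOf r, r)])) PySem.Dict.empty
  groups.items.foldl (fun chosen p =>
    match p.2.filter (fun x => x.1 == target_conns) with
    | e :: _ => chosen ++ [e.2]
    | [] =>
      -- max(lst, key=...); a group's list is never empty, so the none branch is unreachable
      match PySem.List.max? p.2 (fun x => x.1) with
      | some m => chosen ++ [m.2]
      | none => chosen) []

-- ===== PORT B =====
def bstep (target_conns : Int)
    (d : PySem.Dict (Option String) (Int × List (String × String) × Bool))
    (r : List (String × String)) :
    PySem.Dict (Option String) (Int × List (String × String) × Bool) :=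
  let name := nameOf r
  let c := connsOf r
  match d.get? name with
  | none => d.insert name (c, r, c == target_conns)
  | some s =>
    if s.2.2 then d
    else if c == target_conns then d.insert name (c, r, true)
    else if s.1 < c then d.insert name (c, r, false)
    else d

def pick_rows_for_plot_alt (rows : List (List (String × String))) (target_conns : Int) :
    List (List (String × String)) :=
  ((rows.foldl (bstep target_conns) PySem.Dict.empty).values).map (fun v => v.2.1)

-- ===== PRECONDITION & SPEC =====
def Spec_pick_rows_for_plot (rows : List (List (String × String))) (target_conns : Int) (out : List (List (String × String))) : Prop := out = pick_rows_for_plot_alt rows target_conns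
instance (rows : List (List (String × String))) (target_conns : Int) (out : List (List (String × String))) : Decidable (Spec_pick_rows_for_plot rows target_conns out) := by unfold Spec_pick_rows_for_plot; infer_instance

-- ===== CLAIM (what is proved, stated in full; the proofs are below) =====
def Claim_equal_pick_rows_for_plot : Prop := ∀ (rows : List (List (String × String))) (target_conns : Int), Dom_pick_rows_for_plot rows target_conns → Spec_pick_rows_for_plot rows target_conns (pick_rows_for_plot rows target_conns)

-- ===== LEMMAS AND PROOFS =====

-- the group of a name: the (conns, row) pairs of the rows carrying that name, in order
def grp (k : Option String) (rows : List (List (String × String))) :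
    List (Int × List (String × String)) :=
  (rows.filter (fun r => nameOf r == k)).map (fun r => (connsOf r, r))

-- B's per-entry update, on plain triples
def coll1 (t : Int) (s : Int × List (String × String) × Bool) (x : Int × List (String × String)) :
    Int × List (String × String) × Bool :=
  if s.2.2 then s
  else if x.1 == t then (x.1, x.2, true)
  else if s.1 < x.1 then (x.1, x.2, false)
  else s

-- collapse of a (nonempty) group under B's update; junk default on []
def collD (t : Int) (l : List (Int × List (String × String))) :
    Int × List (String × String) × Bool :=
  match l with
  | [] => (0, [], false)
  | y :: ys => ys.foldl (coll1 t) (y.1, y.2, y.1 == t)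

-- running strict max (first maximal element)
def mstep (m x : Int × List (String × String)) : Int × List (String × String) :=
  if m.1 < x.1 then x else m

theorem foldl_locked (t : Int) (ys : List (Int × List (String × String)))
    (s : Int × List (String × String) × Bool) (h : s.2.2 = true) :
    ys.foldl (coll1 t) s = s := by
  induction ys generalizing s with
  | nil => rfl
  | cons x xs ih => simp [coll1, h, ih s h]

theorem foldl_exact (t : Int) (ys : List (Int × List (String × String)))
    (s : Int × List (String × String) × Bool) (h : s.2.2 = false)
    (e : Int × List (String × String)) (rest : List (Int × List (String × String)))
    (hf : ys.filter (fun x => x.1 == t) = e :: rest) :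
    ys.foldl (coll1 t) s = (e.1, e.2, true) := by
  induction ys generalizing s e rest with
  | nil => simp at hf
  | cons x xs ih =>
    by_cases hx : x.1 == t
    · rw [List.filter_cons_of_pos (by simpa using hx)] at hf
      have hxe : x = e := (List.cons.inj hf).1
      subst hxe
      have hstep : coll1 t s x = (x.1, x.2, true) := by simp [coll1, h, hx]
      simp only [List.foldl_cons, hstep]
      exact foldl_locked t xs (x.1, x.2, true) rfl
    · rw [List.filter_cons_of_neg (by simpa using hx)] at hf
      have h2 : (coll1 t s x).2.2 = false := by
        by_cases hlt : s.1 < x.1 <;> simp [coll1, h, hx, hlt]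
      simpa using ih (coll1 t s x) h2 e rest hf

theorem foldl_noexact (t : Int) (ys : List (Int × List (String × String)))
    (s : Int × List (String × String) × Bool) (h : s.2.2 = false)
    (hf : ys.filter (fun x => x.1 == t) = []) :
    ys.foldl (coll1 t) s
      = ((ys.foldl mstep (s.1, s.2.1)).1, (ys.foldl mstep (s.1, s.2.1)).2, false) := by
  induction ys generalizing s with
  | nil =>
    obtain ⟨a, b, c⟩ := s
    simp at h
    simp [h]
  | cons x xs ih =>
    by_cases hx : x.1 == t
    · rw [List.filter_cons_of_pos (by simpa using hx)] at hf
      exact absurd hf (by simp)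
    · rw [List.filter_cons_of_neg (by simpa using hx)] at hf
      have hstep : coll1 t s x = if s.1 < x.1 then (x.1, x.2, false) else s := by
        simp [coll1, h, hx]
      rw [List.foldl_cons, hstep, List.foldl_cons]
      by_cases hlt : s.1 < x.1
      · rw [if_pos hlt,
          show mstep (s.1, s.2.1) x = ((x.1, x.2, (false : Bool)).1, (x.1, x.2, (false : Bool)).2.1) from by
            simp [mstep, hlt]]
        exact ih (x.1, x.2, false) rfl hf
      · rw [if_neg hlt,
          show mstep (s.1, s.2.1) x = (s.1, s.2.1) from by simp [mstep, hlt]]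
        exact ih s h hf

theorem max?_cons_cons (y x : Int × List (String × String)) (ys : List (Int × List (String × String))) :
    PySem.List.max? (y :: x :: ys) (fun z => z.1)
      = PySem.List.max? (mstep y x :: ys) (fun z => z.1) := by
  by_cases h : y.1 < x.1 <;> simp [PySem.List.max?, mstep, h]

theorem max?_cons_foldl (y : Int × List (String × String)) (ys : List (Int × List (String × String))) :
    PySem.List.max? (y :: ys) (fun z => z.1) = some (ys.foldl mstep y) := by
  induction ys generalizing y with
  | nil => simp [PySem.List.max?]
  | cons x xs ih => rw [max?_cons_cons, ih (mstep y x), List.foldl_cons]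

theorem groups_getD (rows : List (List (String × String))) (k : Option String) :
    (rows.foldl (fun d r => d.modify (nameOf r) [] (· ++ [(connsOf r, r)])) PySem.Dict.empty).getD k []
      = grp k rows := by
  have hrw : rows.foldl (fun d r => d.modify (nameOf r) [] (· ++ [(connsOf r, r)])) PySem.Dict.empty
      = (rows.map (fun r => (nameOf r, (connsOf r, r)))).foldl
          (fun d p => d.modify p.1 [] (· ++ [p.2])) PySem.Dict.empty := by
    rw [List.foldl_map]
  rw [hrw, PySem.Dict.getD_foldl_modify_append]
  simp [grp, List.filter_map, List.map_map, Function.comp_def]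

theorem groups_keys (rows : List (List (String × String))) :
    (rows.foldl (fun d r => d.modify (nameOf r) [] (· ++ [(connsOf r, r)])) PySem.Dict.empty).keys
      = PySem.Set.ofList (rows.map nameOf) := by
  rw [PySem.Dict.keys_foldl_modify_key (key := nameOf) (f := fun _ r => (· ++ [(connsOf r, r)]))]
  simp [PySem.Set.update, PySem.Set.ofList_eq_foldl]

theorem collD_append (t : Int) (l : List (Int × List (String × String)))
    (x : Int × List (String × String)) (h : l ≠ []) :
    collD t (l ++ [x]) = coll1 t (collD t l) x := by
  cases l with
  | nil => exact absurd rfl h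
  | cons y ys => simp [collD, List.foldl_append]

theorem ofList_append_singleton {α : Type} [BEq α] (xs : List α) (x : α) :
    PySem.Set.ofList (xs ++ [x]) = PySem.Set.add (PySem.Set.ofList xs) x := by
  simp [PySem.Set.ofList_eq_foldl, List.foldl_append]

theorem set_add_of_mem (K : List (Option String)) (k : Option String) (h : k ∈ K) :
    PySem.Set.add K k = K := by
  simp [PySem.Set.add, PySem.Set.contains, h]

theorem set_add_of_not_mem (K : List (Option String)) (k : Option String) (h : k ∉ K) :
    PySem.Set.add K k = K ++ [k] := by
  simp [PySem.Set.add, PySem.Set.contains, h]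

theorem grp_append (k : Option String) (rs : List (List (String × String)))
    (r : List (String × String)) :
    grp k (rs ++ [r]) = grp k rs ++ (if nameOf r == k then [(connsOf r, r)] else []) := by
  by_cases h : nameOf r == k <;> simp [grp, List.filter_append, h]

theorem grp_ne_nil (k : Option String) (rows : List (List (String × String)))
    (h : k ∈ rows.map nameOf) : grp k rows ≠ [] := by
  obtain ⟨r, hr, hk⟩ := List.mem_map.mp h
  simp only [grp, ne_eq, List.map_eq_nil_iff, List.filter_eq_nil_iff]
  intro hall
  exact hall r hr (by simp [hk])

-- B invariant
theorem best_items (t : Int) (rows : List (List (String × String))) :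
    (rows.foldl (bstep t) PySem.Dict.empty).items
      = (PySem.Set.ofList (rows.map nameOf)).map (fun k => (k, collD t (grp k rows))) := by
  induction rows using List.reverseRecOn with
  | nil => rfl
  | append_singleton rs r ih =>
    rw [List.foldl_append, List.foldl_cons, List.foldl_nil]
    set D := rs.foldl (bstep t) PySem.Dict.empty with hD
    set K := PySem.Set.ofList (rs.map nameOf) with hK
    set k0 := nameOf r with hk0
    have hkeys : D.keys = K := by
      show D.items.map (·.1) = K
      rw [ih, List.map_map]
      simp [Function.comp_def]
    have hndK : K.Nodup := PySem.Set.nodup_ofList _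
    have hnd : D.keys.Nodup := by rw [hkeys]; exact hndK
    have hmapn : (rs ++ [r]).map nameOf = rs.map nameOf ++ [k0] := by simp [hk0]
    by_cases hmem : k0 ∈ K
    · -- existing key
      have hcont : D.contains k0 = true := by
        rw [PySem.Dict.contains_eq_decide_mem_keys, hkeys]; simp [hmem]
      have hget : D.get? k0 = some (collD t (grp k0 rs)) :=
        PySem.Dict.get?_of_mem_items D (by rw [ih]; exact List.mem_map.mpr ⟨k0, hmem, rfl⟩) hnd
      have hgrpne : grp k0 rs ≠ [] := grp_ne_nil _ _ ((PySem.Set.mem_ofList _ _).mp hmem)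
      set s := collD t (grp k0 rs) with hs
      have hRHSK : PySem.Set.ofList ((rs ++ [r]).map nameOf) = K := by
        rw [hmapn, ofList_append_singleton, ← hK, set_add_of_mem _ _ hmem]
      rw [hRHSK]
      -- per-key RHS values
      have hval : ∀ k ∈ K, collD t (grp k (rs ++ [r]))
          = if k = k0 then coll1 t s (connsOf r, r) else collD t (grp k rs) := by
        intro k hk
        by_cases hkk : k = k0
        · subst hkk
          rw [grp_append, if_pos (by simp [← hk0]), collD_append _ _ _ hgrpne, if_pos rfl]
        · rw [grp_append, if_neg (by simp [← hk0]; exact fun hh => hkk hh.symm), if_neg hkk]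
          simp
      have hrepl : ∀ v, (D.insert k0 v).items
          = K.map (fun k => (k, if k = k0 then v else collD t (grp k rs))) := by
        intro v
        rw [PySem.Dict.items_insert_of_contains D v hcont, ih, List.map_map]
        apply List.map_congr_left
        intro k hk
        by_cases hkk : k = k0
        · subst hkk; simp
        · simp [Function.comp, hkk, beq_eq_false_iff_ne.mpr hkk]
      -- case split on bstep's branches
      rw [show bstep t D r =
          (if s.2.2 then D
           else if connsOf r == t then D.insert k0 (connsOf r, r, true)
           else if s.1 < connsOf r then D.insert k0 (connsOf r, r, false)
           else D) from by
        simp only [bstep, ← hk0, hget]]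
      by_cases h1 : s.2.2
      · rw [if_pos h1, ih]
        apply (List.map_congr_left ?_).symm
        intro k hk
        rw [hval k hk]
        by_cases hkk : k = k0
        · subst hkk; rw [← hs]; simp [coll1, h1]
        · simp [hkk]
      · rw [if_neg h1]
        by_cases h2 : connsOf r == t
        · rw [if_pos h2, hrepl]
          apply (List.map_congr_left ?_).symm
          intro k hk
          rw [hval k hk]
          by_cases hkk : k = k0
          · subst hkk
            simp [coll1, h1, h2]
          · simp [hkk]
        · rw [if_neg h2]
          by_cases h3 : s.1 < connsOf r
          · rw [if_pos h3, hrepl]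
            apply (List.map_congr_left ?_).symm
            intro k hk
            rw [hval k hk]
            by_cases hkk : k = k0
            · subst hkk
              simp [coll1, h1, h2, h3]
            · simp [hkk]
          · rw [if_neg h3, ih]
            apply (List.map_congr_left ?_).symm
            intro k hk
            rw [hval k hk]
            by_cases hkk : k = k0
            · subst hkk; rw [← hs]; simp [coll1, h1, h2, h3]
            · simp [hkk]
    · -- new key
      have hget : D.get? k0 = none := by
        rw [PySem.Dict.get?_eq_none_iff_not_mem_keys, hkeys]; exact hmem
      have hcont : D.contains k0 = false := by
        rw [PySem.Dict.contains_eq_decide_mem_keys, hkeys]; simp [hmem]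
      have hstep : bstep t D r = D.insert k0 (connsOf r, r, connsOf r == t) := by
        simp only [bstep, ← hk0, hget]
      rw [hstep, PySem.Dict.items_insert_of_not_contains D _ hcont, ih]
      have hRHSK : PySem.Set.ofList ((rs ++ [r]).map nameOf) = K ++ [k0] := by
        rw [hmapn, ofList_append_singleton, ← hK, set_add_of_not_mem _ _ hmem]
      rw [hRHSK, List.map_append]
      congr 1
      · apply List.map_congr_left
        intro k hk
        have hkk : k ≠ k0 := fun h => hmem (h ▸ hk)
        rw [grp_append, if_neg (by simp [← hk0]; exact fun hh => hkk hh.symm)]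
        simp
      · have hgrp0 : grp k0 rs = [] := by
          simp only [grp, List.map_eq_nil_iff, List.filter_eq_nil_iff]
          intro r' hr'
          have : nameOf r' ∈ rs.map nameOf := List.mem_map.mpr ⟨r', hr', rfl⟩
          have hne : nameOf r' ≠ k0 := fun h => hmem (by
            rw [← h]
            exact (PySem.Set.mem_ofList _ _).mpr this)
          simp [hne]
        rw [List.map_singleton, grp_append, hgrp0, if_pos (by simp [← hk0])]
        rfl


-- A's per-group choice equals the row stored by B's collapse
theorem step_pick (t : Int) (acc : List (List (String × String)))
    (l : List (Int × List (String × String))) (h : l ≠ []) :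
    (match l.filter (fun x => x.1 == t) with
     | e :: _ => acc ++ [e.2]
     | [] =>
       match PySem.List.max? l (fun x => x.1) with
       | some m => acc ++ [m.2]
       | none => acc) = acc ++ [(collD t l).2.1] := by
  cases l with
  | nil => exact absurd rfl h
  | cons y ys =>
    by_cases hy : y.1 == t
    · rw [List.filter_cons_of_pos (by simpa using hy)]
      have : collD t (y :: ys) = (y.1, y.2, true) := by
        show ys.foldl (coll1 t) (y.1, y.2, y.1 == t) = _
        rw [show (y.1 == t) = true from hy]
        exact foldl_locked t ys (y.1, y.2, true) rfl
      rw [this]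
    · rw [List.filter_cons_of_neg (by simpa using hy)]
      have hinit : collD t (y :: ys) = ys.foldl (coll1 t) (y.1, y.2, false) := by
        show ys.foldl (coll1 t) (y.1, y.2, y.1 == t) = _
        rw [show (y.1 == t) = false from by simpa using hy]
      cases hfy : ys.filter (fun x => x.1 == t) with
      | cons e rest =>
        rw [hinit, foldl_exact t ys (y.1, y.2, false) rfl e rest hfy]
      | nil =>
        rw [hinit, foldl_noexact t ys (y.1, y.2, false) rfl hfy,
          max?_cons_foldl y ys]

-- ===== VERDICT (by name: the statement is the Claim_ definition above) =====
theorem pick_rows_for_plot_spec : Claim_equal_pick_rows_for_plot := by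
  intro rows t _hdom
  show pick_rows_for_plot rows t = pick_rows_for_plot_alt rows t
  rw [pick_rows_for_plot, pick_rows_for_plot_alt]
  set G := rows.foldl (fun d r => d.modify (nameOf r) [] (· ++ [(connsOf r, r)])) PySem.Dict.empty with hG
  have hkeys : G.keys = PySem.Set.ofList (rows.map nameOf) := groups_keys rows
  have hnd : G.keys.Nodup := by rw [hkeys]; exact PySem.Set.nodup_ofList _
  have hitems : G.items = (PySem.Set.ofList (rows.map nameOf)).map (fun k => (k, grp k rows)) := by
    rw [PySem.Dict.items_eq_map_keys G hnd [], hkeys]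
    exact List.map_congr_left (fun k _ => by rw [groups_getD])
  have hne : ∀ p ∈ G.items, p.2 ≠ [] := by
    intro p hp
    rw [hitems] at hp
    obtain ⟨k, hk, rfl⟩ := List.mem_map.mp hp
    exact grp_ne_nil k rows ((PySem.Set.mem_ofList _ _).mp hk)
  rw [PySem.List.foldl_congr_mem G.items _
      (fun acc p => acc ++ [(collD t p.2).2.1]) []
      (fun acc p hp => step_pick t acc p.2 (hne p hp)),
    PySem.List.foldl_append_singleton_eq_map, List.nil_append,
    show (rows.foldl (bstep t) PySem.Dict.empty).values
        = (rows.foldl (bstep t) PySem.Dict.empty).items.map (·.2) from rfl,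
    best_items, hitems]
  simp [List.map_map, Function.comp_def]
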